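-- pv_equiv track=rewrite | github.com/K-J-HYEON/pythonCodingTest | new/programmers/lv2/SquareProblem.py | solution
-- ===== SOURCE A (Python) =====
-- def solution(w,h):
--     w_list = []
--     h_list = []
--     for i in range(1, w+1):
--         if w % i == 0:
--             w_list.append(i)
--     for i in range(1, h+1):
--         if h%i == 0:
--             h_list.append(i)
--     hw_list = set(w_list).intersection(h_list)
--     return w*h - (w+h-max(hw_list))
-- ===== SOURCE B (Python) =====
-- def solution(w, h):
--     # Euclidean algorithm for the gcd instead of enumerating divisor lists.
--     a, b = w, h
--     while b:
--         a, b = b, a % b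
--     return w * h - (w + h - a)
-- ===== Notes on version B (the rewrite author's own statement) =====
-- stated objective: faster
-- what changed: Replaces the two divisor-enumeration loops plus set intersection and max by the Euclidean algorithm for gcd(w,h), returning w*h - (w+h-gcd).
import Mathlib
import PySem

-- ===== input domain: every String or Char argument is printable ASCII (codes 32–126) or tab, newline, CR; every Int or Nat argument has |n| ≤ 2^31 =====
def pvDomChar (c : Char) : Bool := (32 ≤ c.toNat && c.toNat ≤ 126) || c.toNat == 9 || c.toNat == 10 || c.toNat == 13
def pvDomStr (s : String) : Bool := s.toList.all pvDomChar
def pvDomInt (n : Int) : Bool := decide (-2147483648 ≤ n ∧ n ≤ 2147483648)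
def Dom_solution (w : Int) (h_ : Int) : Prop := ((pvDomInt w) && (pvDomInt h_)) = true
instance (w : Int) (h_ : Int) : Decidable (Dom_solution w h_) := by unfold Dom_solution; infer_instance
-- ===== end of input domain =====

-- B computes gcd(w,h) by the Euclidean algorithm instead of enumerating and intersecting
-- divisor lists; return value only (neither version mutates its arguments).

-- ===== PORT A =====
def solution (w : Int) (h_ : Int) : Int :=
  let w_list : List Int :=
    (PySem.List.pyRange 1 (w + 1) 1).foldl
      (fun acc i => if PySem.Int.mod w i == 0 then acc ++ [i] else acc) []
  let h_list : List Int :=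
    (PySem.List.pyRange 1 (h_ + 1) 1).foldl
      (fun acc i => if PySem.Int.mod h_ i == 0 then acc ++ [i] else acc) []
  let hw_list : PySem.Set Int := PySem.Set.inter (PySem.Set.ofList w_list) h_list
  -- Python's max(hw_list) raises ValueError when hw_list is empty; Pre_solution excludes that.
  w * h_ - (w + h_ - (PySem.List.max? hw_list (fun x => x)).getD 0)

-- ===== PORT B =====
-- termination helper for the Euclidean loop (Python '%' shrinks |b|)
theorem pvModNatAbsLt (a b : Int) (hb : ¬ b = 0) :
    (PySem.Int.mod a b).natAbs < b.natAbs := by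
  rcases lt_trichotomy b 0 with hneg | hz | hpos
  · have := PySem.Int.mod_neg_bounds a hneg
    omega
  · exact absurd hz hb
  · have h1 := PySem.Int.mod_nonneg a hpos
    have h2 := PySem.Int.mod_lt a hpos
    omega

def euclidLoop (a b : Int) : Int :=
  if h : b = 0 then a else euclidLoop b (PySem.Int.mod a b)
termination_by b.natAbs
decreasing_by exact pvModNatAbsLt a b h

def solution_alt (w : Int) (h_ : Int) : Int :=
  w * h_ - (w + h_ - euclidLoop w h_)

-- ===== PRECONDITION & SPEC =====
-- Pre_ excludes exactly w ≤ 0 or h ≤ 0, where A's max() is applied to an empty set and raises ValueError.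
def Pre_solution (w : Int) (h_ : Int) : Prop := 1 ≤ w ∧ 1 ≤ h_
instance (w : Int) (h_ : Int) : Decidable (Pre_solution w h_) := by unfold Pre_solution; infer_instance
def pvWitness_solution : Int × Int := (6, 8)
def Spec_solution (w : Int) (h_ : Int) (out : Int) : Prop := out = solution_alt w h_
instance (w : Int) (h_ : Int) (out : Int) : Decidable (Spec_solution w h_ out) := by unfold Spec_solution; infer_instance

-- ===== CLAIM (what is proved, stated in full; the proofs are below) =====
def Claim_equal_solution : Prop := ∀ (w : Int) (h_ : Int), Dom_solution w h_ → Pre_solution w h_ → Spec_solution w h_ (solution w h_)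

-- ===== LEMMAS AND PROOFS =====

theorem euclid_eq_gcd (n : Nat) : ∀ (b a : Int), b.natAbs = n → 0 ≤ a → 0 ≤ b →
    euclidLoop a b = (Int.gcd a b : Int) := by
  induction n using Nat.strong_induction_on with
  | _ n ih =>
    intro b a hbn ha hb
    rw [euclidLoop]
    split
    case isTrue h =>
      subst h
      rw [Int.gcd_zero_right, Int.natAbs_of_nonneg ha]
    case isFalse h =>
      have hbpos : 0 < b := lt_of_le_of_ne hb (Ne.symm h)
      rw [PySem.Int.mod_eq_emod_of_pos hbpos]
      have h1 : 0 ≤ a % b := Int.emod_nonneg a (ne_of_gt hbpos)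
      have h2 : (a % b).natAbs < n := by
        have := Int.emod_lt_of_pos a hbpos; omega
      rw [ih _ h2 (a % b) b rfl hb h1, Int.gcd_comm b (a % b), Int.gcd_emod]

theorem solution_spec : Claim_equal_solution := by
  intro w h_ _ hpre
  obtain ⟨hw1, hh1⟩ := hpre
  show solution w h_ = solution_alt w h_
  unfold solution solution_alt
  simp only [PySem.List.foldl_append_if_eq_filter, List.nil_append]
  set g : Int := (Int.gcd w h_ : Int) with hg
  have hgpos : 0 < g := by
    have : w.gcd h_ ≠ 0 := by
      intro h0
      have := Int.eq_zero_of_gcd_eq_zero_left h0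
      omega
    omega
  have mem_hw : ∀ x : Int,
      x ∈ PySem.Set.inter
            (PySem.Set.ofList ((PySem.List.pyRange 1 (w + 1) 1).filter (fun i => PySem.Int.mod w i == 0)))
            ((PySem.List.pyRange 1 (h_ + 1) 1).filter (fun i => PySem.Int.mod h_ i == 0))
      ↔ ((1 ≤ x ∧ x < w + 1) ∧ x ∣ w) ∧ ((1 ≤ x ∧ x < h_ + 1) ∧ x ∣ h_) := by
    intro x
    simp [PySem.Set.inter, PySem.Set.contains, List.mem_filter, PySem.Set.mem_ofList,
      PySem.List.mem_pyRange_one, PySem.Int.mod_eq_zero_iff_dvd, and_assoc]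
  have hg_mem : g ∈ PySem.Set.inter
            (PySem.Set.ofList ((PySem.List.pyRange 1 (w + 1) 1).filter (fun i => PySem.Int.mod w i == 0)))
            ((PySem.List.pyRange 1 (h_ + 1) 1).filter (fun i => PySem.Int.mod h_ i == 0)) := by
    rw [mem_hw]
    have hdw : g ∣ w := by rw [hg]; exact Int.gcd_dvd_left w h_
    have hdh : g ∣ h_ := by rw [hg]; exact Int.gcd_dvd_right w h_
    have hlw : g ≤ w := Int.le_of_dvd (by omega) hdw
    have hlh : g ≤ h_ := Int.le_of_dvd (by omega) hdh
    exact ⟨⟨⟨by omega, by omega⟩, hdw⟩, ⟨⟨by omega, by omega⟩, hdh⟩⟩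
  obtain ⟨m, hm⟩ : ∃ m, PySem.List.max?
      (PySem.Set.inter
        (PySem.Set.ofList ((PySem.List.pyRange 1 (w + 1) 1).filter (fun i => PySem.Int.mod w i == 0)))
        ((PySem.List.pyRange 1 (h_ + 1) 1).filter (fun i => PySem.Int.mod h_ i == 0)))
      (fun x => x) = some m := by
    cases hmax : PySem.List.max?
      (PySem.Set.inter
        (PySem.Set.ofList ((PySem.List.pyRange 1 (w + 1) 1).filter (fun i => PySem.Int.mod w i == 0)))
        ((PySem.List.pyRange 1 (h_ + 1) 1).filter (fun i => PySem.Int.mod h_ i == 0)))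
      (fun x => x) with
    | none =>
      rw [PySem.List.max?_eq_none_iff] at hmax
      rw [hmax] at hg_mem
      exact absurd hg_mem (List.not_mem_nil)
    | some m => exact ⟨m, rfl⟩
  have hm_mem := PySem.List.max?_mem hm
  rw [mem_hw] at hm_mem
  obtain ⟨⟨_, hmw⟩, ⟨_, hmh⟩⟩ := hm_mem
  have hmnat : m.natAbs ∣ Int.gcd w h_ := by
    rw [Int.gcd_def]
    exact Nat.dvd_gcd (Int.natAbs_dvd_natAbs.mpr hmw) (Int.natAbs_dvd_natAbs.mpr hmh)
  have hmg : m ∣ g := by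
    rw [hg]
    exact Int.natAbs_dvd.mp (Int.ofNat_dvd.mpr hmnat)
  have hm_le : m ≤ g := Int.le_of_dvd hgpos hmg
  have hg_le : g ≤ m := PySem.List.max?_isMax hm g hg_mem
  have hmeq : m = g := le_antisymm hm_le hg_le
  have heuclid : euclidLoop w h_ = g :=
    euclid_eq_gcd h_.natAbs h_ w rfl (by omega) (by omega)
  rw [hm, heuclid, hmeq]
  rfl
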